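-- pv_equiv track=rewrite | github.com/ivenpoker/Python-Projects | Projects/Online Workouts/w3resource/String/program-68.py | process_str
-- ===== SOURCE A (Python) =====
-- def process_str(main_str: str) -> dict:
--     data = dict(repeat='', unique='')
--     found_repeat = []
--     for char in main_str:
--         if main_str.count(char) > 1:
--             if char not in found_repeat:
--                 data['repeat'] += char
--                 found_repeat.append(char)
--         else:
--             data['unique'] += char
--     return data
-- ===== SOURCE B (Python) =====
-- def process_str(main_str: str) -> dict:
--     # Positional classification: a character at index i is a first occurrence iff it is
--     # not in the prefix main_str[:i]; it is repeated iff it also occurs in the suffix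
--     # main_str[i+1:], unique iff it occurs in neither. No counter and no seen-list.
--     repeat = ''.join(c for i, c in enumerate(main_str)
--                      if c not in main_str[:i] and c in main_str[i + 1:])
--     unique = ''.join(c for i, c in enumerate(main_str)
--                      if c not in main_str[:i] and c not in main_str[i + 1:])
--     return dict(repeat=repeat, unique=unique)
-- ===== Notes on version B (the rewrite author's own statement) =====
-- stated objective: alternative
-- what changed: A's single stateful loop (per-char str.count plus a mutable found_repeat seen-list) is replaced by a stateless positional classification: each index i is tested by membership of its character in the prefix main_str[:i] (first occurrence?) and the suffix main_str[i+1:] (repeated later?), with two independent comprehensions over enumerate and no counter or seen-list at all.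
import Mathlib
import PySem

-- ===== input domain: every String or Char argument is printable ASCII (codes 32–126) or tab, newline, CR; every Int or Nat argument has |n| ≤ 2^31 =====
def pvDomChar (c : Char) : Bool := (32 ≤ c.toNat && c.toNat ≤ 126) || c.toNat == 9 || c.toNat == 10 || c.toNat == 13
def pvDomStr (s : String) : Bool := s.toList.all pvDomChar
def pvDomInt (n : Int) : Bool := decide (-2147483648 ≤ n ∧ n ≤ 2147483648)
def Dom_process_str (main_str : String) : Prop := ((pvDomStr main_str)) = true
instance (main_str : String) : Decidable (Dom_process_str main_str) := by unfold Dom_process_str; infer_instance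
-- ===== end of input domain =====

-- B replaces A's stateful loop (per-char str.count + mutable seen-list) by a stateless
-- positional classification via membership in the prefix s[:i] and the suffix s[i+1:].

-- ===== PORT A =====
-- `main_str.count(char)` → PySem.Str.count on the one-char string; `data['repeat'] += char`
-- reads and overwrites an existing key → getD/insert; `found_repeat.append(char)` → ++ [char].
def process_str (main_str : String) : List (String × String) :=
  let st := main_str.toList.foldl
    (fun (st : PySem.Dict String String × List Char) char =>
      if PySem.Str.count main_str (String.ofList [char]) > 1 then
        if !(st.2.contains char) then
          (st.1.insert "repeat" (st.1.getD "repeat" "" ++ String.ofList [char]), st.2 ++ [char])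
        else st
      else
        (st.1.insert "unique" (st.1.getD "unique" "" ++ String.ofList [char]), st.2))
    (PySem.Dict.ofList [("repeat", ""), ("unique", "")], ([] : List Char))
  st.1.items

-- ===== PORT B =====
-- `enumerate(main_str)` → PySem.List.enumerate; the slices `main_str[:i]`, `main_str[i+1:]`
-- → PySem.List.slice; `c in <string>` for the single character c is membership of that
-- character (exact for a length-1 needle) → List.contains on the slice's char list.
def process_str_alt (main_str : String) : List (String × String) :=
  let l := main_str.toList
  let rep := String.ofList (((PySem.List.enumerate l 0).filter
      (fun p => !((PySem.List.slice l none (some p.1)).contains p.2)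
                && (PySem.List.slice l (some (p.1 + 1)) none).contains p.2)).map (·.2))
  let uniq := String.ofList (((PySem.List.enumerate l 0).filter
      (fun p => !((PySem.List.slice l none (some p.1)).contains p.2)
                && !((PySem.List.slice l (some (p.1 + 1)) none).contains p.2))).map (·.2))
  [("repeat", rep), ("unique", uniq)]

-- ===== PRECONDITION & SPEC =====
def Spec_process_str (main_str : String) (out : List (String × String)) : Prop := out = process_str_alt main_str
instance (main_str : String) (out : List (String × String)) : Decidable (Spec_process_str main_str out) := by unfold Spec_process_str; infer_instance

-- ===== CLAIM (what is proved, stated in full; the proofs are below) =====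
def Claim_equal_process_str : Prop := ∀ (main_str : String), Dom_process_str main_str → Spec_process_str main_str (process_str main_str)

-- ===== LEMMAS AND PROOFS =====

-- str.count of a one-character needle is the character count
theorem count_go_singleton (c : Char) (l : List Char) : ∀ (fuel acc : Nat), l.length ≤ fuel →
    PySem.Chars.count.go [c] fuel l acc = acc + l.count c := by
  induction l with
  | nil => intro fuel acc _; cases fuel <;> simp [PySem.Chars.count.go]
  | cons h t ih =>
    intro fuel acc hf
    cases fuel with
    | zero => simp at hf
    | succ n =>
      have ht : t.length ≤ n := by simpa using hf
      by_cases hc : c = h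
      · subst hc
        simp [PySem.Chars.count.go, List.isPrefixOf, ih n (acc + 1) ht]
        omega
      · have h1 : (c == h) = false := by simpa using hc
        have h2 : (h == c) = false := by simpa using Ne.symm hc
        simp [PySem.Chars.count.go, List.isPrefixOf, h1, h2, ih n acc ht, List.count_cons]

theorem count_singleton (s : List Char) (c : Char) : PySem.Chars.count s [c] = s.count c := by
  simp [PySem.Chars.count, count_go_singleton c s s.length 0 le_rfl]

-- first-occurrence collection of the not-yet-seen characters, relative to a seen list
def auxD (found : List Char) : List Char → List Char
  | [] => []
  | c :: t => if found.contains c then auxD found t else c :: auxD (found ++ [c]) t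

theorem auxD_congr (xs : List Char) : ∀ found found' : List Char,
    (∀ x, x ∈ found ↔ x ∈ found') → auxD found xs = auxD found' xs := by
  induction xs with
  | nil => intro _ _ _; simp [auxD]
  | cons c t ih =>
    intro found found' h
    by_cases hm : c ∈ found
    · have hm' : c ∈ found' := (h c).mp hm
      simp only [auxD]
      rw [if_pos (by simpa using hm), if_pos (by simpa using hm'), ih found found' h]
    · have hm' : c ∉ found' := fun hx => hm ((h c).mpr hx)
      simp only [auxD]
      rw [if_neg (by simpa using hm), if_neg (by simpa using hm')]
      rw [ih (found ++ [c]) (found' ++ [c]) (by intro x; simp [h x])]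

theorem auxD_notmem (xs : List Char) : ∀ (c : Char) (found : List Char), c ∉ xs →
    auxD (found ++ [c]) xs = auxD found xs := by
  induction xs with
  | nil => intro _ _ _; simp [auxD]
  | cons d t ih =>
    intro c found hc
    have hdc : d ≠ c := fun h => hc (h ▸ List.mem_cons_self)
    have hct : c ∉ t := fun h => hc (List.mem_cons_of_mem _ h)
    by_cases hm : d ∈ found
    · simp only [auxD]
      rw [if_pos (by simp [hm]), if_pos (by simpa using hm), ih c found hct]
    · simp only [auxD]
      rw [if_neg (by simp [hm, hdc]), if_neg (by simpa using hm)]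
      have hcg : auxD (found ++ [c] ++ [d]) t = auxD (found ++ [d] ++ [c]) t := by
        apply auxD_congr; intro x; simp; tauto
      rw [hcg, ih c (found ++ [d]) hct]

-- A's loop, characterised: 'repeat' collects the first occurrences of the P-characters
-- not yet seen, 'unique' collects the non-P characters, in order.
theorem loopA (P : Char → Prop) [DecidablePred P] (l : List Char) :
    ∀ (R U found : List Char),
    l.foldl
      (fun (st : PySem.Dict String String × List Char) char =>
        if P char then
          if !(st.2.contains char) then
            (st.1.insert "repeat" (st.1.getD "repeat" "" ++ String.ofList [char]), st.2 ++ [char])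
          else st
        else
          (st.1.insert "unique" (st.1.getD "unique" "" ++ String.ofList [char]), st.2))
      (PySem.Dict.mk [("repeat", String.ofList R), ("unique", String.ofList U)], found)
    = (PySem.Dict.mk
        [("repeat", String.ofList (R ++ auxD found (l.filter (fun c => decide (P c))))),
         ("unique", String.ofList (U ++ l.filter (fun c => !decide (P c))))],
       found ++ auxD found (l.filter (fun c => decide (P c)))) := by
  induction l with
  | nil => intro R U found; simp [auxD]
  | cons c t ih =>
    intro R U found
    simp only [List.foldl_cons, List.filter_cons]
    by_cases hp : P c
    · by_cases hf : found.contains c = true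
      · rw [if_pos hp, hf]
        simp only [Bool.not_true]
        rw [if_neg Bool.false_ne_true]
        rw [ih R U found]
        have hm : c ∈ found := by simpa using hf
        simp [auxD, hp, hm]
      · have hf' : found.contains c = false := by simpa using hf
        rw [if_pos hp, hf']
        simp only [Bool.not_false, if_true]
        have hg : (PySem.Dict.mk [("repeat", String.ofList R), ("unique", String.ofList U)]).getD "repeat" "" = String.ofList R := by
          simp [PySem.Dict.getD, PySem.Dict.get?_mk_cons]
        have hi : (PySem.Dict.mk [("repeat", String.ofList R), ("unique", String.ofList U)]).insert "repeat" (String.ofList R ++ String.ofList [c])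
            = PySem.Dict.mk [("repeat", String.ofList (R ++ [c])), ("unique", String.ofList U)] := by
          have : String.ofList R ++ String.ofList [c] = String.ofList (R ++ [c]) := by
            apply String.ext; simp
          rw [this]; simp [PySem.Dict.insert]
        rw [hg, hi, ih (R ++ [c]) U (found ++ [c])]
        have hm : c ∉ found := by simpa using hf
        simp [auxD, hp, hm, List.append_assoc]
    · rw [if_neg hp]
      have hg : (PySem.Dict.mk [("repeat", String.ofList R), ("unique", String.ofList U)]).getD "unique" "" = String.ofList U := by
        simp [PySem.Dict.getD, PySem.Dict.get?_mk_cons]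
      have hi : (PySem.Dict.mk [("repeat", String.ofList R), ("unique", String.ofList U)]).insert "unique" (String.ofList U ++ String.ofList [c])
          = PySem.Dict.mk [("repeat", String.ofList R), ("unique", String.ofList (U ++ [c]))] := by
        have : String.ofList U ++ String.ofList [c] = String.ofList (U ++ [c]) := by
          apply String.ext; simp
        rw [this]; simp [PySem.Dict.insert]
      rw [hg, hi, ih R (U ++ [c]) found]
      simp [hp, List.append_assoc]

-- B's 'repeat' pass, characterised: with prefix `pre` already consumed, the positional
-- filter over the rest equals auxD over the repeated (count > 1) characters of the rest.
theorem loopB_rep (t : List Char) : ∀ pre : List Char,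
    (((PySem.List.enumerate t (pre.length : Int)).filter
        (fun p => !((PySem.List.slice (pre ++ t) none (some p.1)).contains p.2)
                  && (PySem.List.slice (pre ++ t) (some (p.1 + 1)) none).contains p.2)).map (·.2))
    = auxD pre (t.filter (fun c => decide (1 < (pre ++ t).count c))) := by
  induction t with
  | nil => intro pre; simp [PySem.List.enumerate_nil, auxD]
  | cons c t' ih =>
    intro pre
    rw [PySem.List.enumerate_cons]
    have hsl1 : PySem.List.slice (pre ++ c :: t') none (some (pre.length : Int)) = pre := by
      rw [PySem.List.slice_to_natCast]; simp
    have hsl2 : PySem.List.slice (pre ++ c :: t') (some ((pre.length : Int) + 1)) none = t' := by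
      have : (pre.length : Int) + 1 = ((pre.length + 1 : Nat) : Int) := by push_cast; ring
      rw [this, PySem.List.slice_from_natCast]
      rw [show pre.length + 1 = (pre ++ [c]).length by simp]
      rw [show pre ++ c :: t' = (pre ++ [c]) ++ t' by simp]
      simp
    have hcount : (pre ++ c :: t').count c = pre.count c + 1 + t'.count c := by
      simp [List.count_append]; ring
    have hstep : (pre.length : Int) + 1 = ((pre ++ [c]).length : Int) := by simp
    simp only [List.filter_cons, hsl1, hsl2]
    by_cases hcp : c ∈ pre
    · -- already seen: B skips it (in prefix); the count filter keeps it, auxD skips it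
      have h1 : pre.contains c = true := by simpa using hcp
      have h2 : 1 < (pre ++ c :: t').count c := by
        have : 0 < pre.count c := List.count_pos_iff.mpr hcp
        omega
      rw [if_neg (show ¬((!pre.contains c && t'.contains c) = true) by simp [hcp]),
          if_pos (show decide (1 < (pre ++ c :: t').count c) = true by simpa using h2)]
      have ht : auxD pre (c :: t'.filter (fun x => decide (1 < (pre ++ c :: t').count x)))
          = auxD pre (t'.filter (fun x => decide (1 < (pre ++ c :: t').count x))) := by
        simp [auxD, hcp]
      rw [ht, hstep]
      rw [show pre ++ c :: t' = (pre ++ [c]) ++ t' by simp] at *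
      rw [ih (pre ++ [c])]
      apply auxD_congr
      intro x; simp; intro h; subst h; exact hcp
    · have h1 : pre.contains c = false := by simpa using hcp
      have h0 : pre.count c = 0 := List.count_eq_zero.mpr hcp
      by_cases hct : c ∈ t'
      · -- first occurrence of a repeated char: both keep it
        have h2 : t'.contains c = true := by simpa using hct
        have h3 : 1 < (pre ++ c :: t').count c := by
          have : 0 < t'.count c := List.count_pos_iff.mpr hct
          omega
        rw [if_pos (show (!pre.contains c && t'.contains c) = true by simp [hcp, hct]),
            if_pos (show decide (1 < (pre ++ c :: t').count c) = true by simpa using h3)]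
        have ha : auxD pre (c :: t'.filter (fun x => decide (1 < (pre ++ c :: t').count x)))
            = c :: auxD (pre ++ [c]) (t'.filter (fun x => decide (1 < (pre ++ c :: t').count x))) := by
          simp [auxD, hcp]
        rw [ha]
        simp only [List.map_cons]
        rw [hstep]
        rw [show pre ++ c :: t' = (pre ++ [c]) ++ t' by simp] at *
        rw [ih (pre ++ [c])]
      · -- unique char: both drop it
        have h2 : t'.contains c = false := by simpa using hct
        have h3 : ¬ (1 < (pre ++ c :: t').count c) := by
          have : t'.count c = 0 := List.count_eq_zero.mpr hct
          omega
        rw [if_neg (show ¬((!pre.contains c && t'.contains c) = true) by simp [hct]),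
            if_neg (show ¬(decide (1 < (pre ++ c :: t').count c) = true) by simpa using h3)]
        rw [hstep]
        rw [show pre ++ c :: t' = (pre ++ [c]) ++ t' by simp] at *
        rw [ih (pre ++ [c])]
        apply auxD_notmem
        intro hx
        exact hct (List.mem_of_mem_filter hx)

-- B's 'unique' pass, characterised.
theorem loopB_uniq (t : List Char) : ∀ pre : List Char,
    (((PySem.List.enumerate t (pre.length : Int)).filter
        (fun p => !((PySem.List.slice (pre ++ t) none (some p.1)).contains p.2)
                  && !((PySem.List.slice (pre ++ t) (some (p.1 + 1)) none).contains p.2))).map (·.2))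
    = t.filter (fun c => !decide (1 < (pre ++ t).count c)) := by
  induction t with
  | nil => intro pre; simp [PySem.List.enumerate_nil]
  | cons c t' ih =>
    intro pre
    rw [PySem.List.enumerate_cons]
    have hsl1 : PySem.List.slice (pre ++ c :: t') none (some (pre.length : Int)) = pre := by
      rw [PySem.List.slice_to_natCast]; simp
    have hsl2 : PySem.List.slice (pre ++ c :: t') (some ((pre.length : Int) + 1)) none = t' := by
      have : (pre.length : Int) + 1 = ((pre.length + 1 : Nat) : Int) := by push_cast; ring
      rw [this, PySem.List.slice_from_natCast]
      rw [show pre.length + 1 = (pre ++ [c]).length by simp]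
      rw [show pre ++ c :: t' = (pre ++ [c]) ++ t' by simp]
      simp
    have hcnt : (pre ++ c :: t').count c = pre.count c + 1 + t'.count c := by
      simp [List.count_append]; ring
    have hstep : (pre.length : Int) + 1 = ((pre ++ [c]).length : Int) := by simp
    simp only [List.filter_cons, hsl1, hsl2]
    -- the positional head test agrees with the count-based one
    have hiff : (!pre.contains c && !t'.contains c) = !decide (1 < (pre ++ c :: t').count c) := by
      by_cases hp : c ∈ pre
      · have h1 : pre.contains c = true := by simpa using hp
        have : 0 < pre.count c := List.count_pos_iff.mpr hp
        have h2 : 1 < (pre ++ c :: t').count c := by omega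
        simp [hp]
        omega
      · have h1 : pre.contains c = false := by simpa using hp
        have h0 : pre.count c = 0 := List.count_eq_zero.mpr hp
        by_cases ht : c ∈ t'
        · have h2 : t'.contains c = true := by simpa using ht
          have : 0 < t'.count c := List.count_pos_iff.mpr ht
          have h3 : 1 < (pre ++ c :: t').count c := by omega
          simp [ht]
          omega
        · have h2 : t'.contains c = false := by simpa using ht
          have h0' : t'.count c = 0 := List.count_eq_zero.mpr ht
          have h3 : ¬ (1 < (pre ++ c :: t').count c) := by omega
          simp [hp, ht]
          omega
    rw [hiff]
    by_cases hb : (1 < (pre ++ c :: t').count c)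
    · have hne : ¬((!decide (1 < (pre ++ c :: t').count c)) = true) := by simp; omega
      rw [if_neg hne, if_neg hne, hstep, show pre ++ c :: t' = (pre ++ [c]) ++ t' by simp] at *
      rw [ih (pre ++ [c])]
    · have hpo : ((!decide (1 < (pre ++ c :: t').count c)) = true) := by simp; omega
      rw [if_pos hpo, if_pos hpo]
      simp only [List.map_cons]
      rw [hstep, show pre ++ c :: t' = (pre ++ [c]) ++ t' by simp] at *
      rw [ih (pre ++ [c])]

-- ===== VERDICT (by name: the statement is the Claim_ definition above) =====
theorem process_str_spec : Claim_equal_process_str := by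
  intro s _
  unfold Spec_process_str
  simp only [process_str, process_str_alt]
  rw [show (PySem.Dict.ofList [("repeat", ""), ("unique", "")] : PySem.Dict String String)
      = PySem.Dict.mk [("repeat", String.ofList []), ("unique", String.ofList [])] from rfl]
  rw [loopA (fun char => PySem.Str.count s (String.ofList [char]) > 1) s.toList [] [] []]
  have hB1 := loopB_rep s.toList []
  have hB2 := loopB_uniq s.toList []
  simp only [List.length_nil, Nat.cast_zero, List.nil_append] at hB1 hB2
  rw [hB1, hB2]
  have hsc : ∀ c : Char, PySem.Str.count s (String.ofList [c]) = s.toList.count c := by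
    intro c
    rw [PySem.Str.count_eq]
    simpa using count_singleton s.toList c
  have hfe : s.toList.filter (fun c => decide (PySem.Str.count s (String.ofList [c]) > 1))
      = s.toList.filter (fun c => decide (1 < s.toList.count c)) := by
    apply List.filter_congr
    intro c _
    rw [hsc c]
  have hfu : s.toList.filter (fun c => !decide (PySem.Str.count s (String.ofList [c]) > 1))
      = s.toList.filter (fun c => !decide (1 < s.toList.count c)) := by
    apply List.filter_congr
    intro c _
    rw [hsc c]
  rw [hfe, hfu]
  simp only [List.nil_append]
  rfl
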